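-- pv_equiv track=rewrite | github.com/jayli/vim-easydebugger | examples/python/inherit/all.py | get_root_number
-- ===== SOURCE A (Python) =====
-- def get_root_number(line_number, full_output):
--     myroot = 0
--     current_length = len(full_output[line_number])
--     index = line_number - 1
--     while index > 0:
--         # 寻找根节点
--         tmp = full_output[index]
--         if len(tmp) == current_length - 1: # 找到根节点
--             myroot = index
--             break
--         index -= 1
--     return myroot
-- ===== SOURCE B (Python) =====
-- def get_root_number(line_number, full_output):
--     current_length = len(full_output[line_number])
--     last_index_by_length = {}
--     for i in range(1, line_number):
--         last_index_by_length[len(full_output[i])] = i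
--     return last_index_by_length.get(current_length - 1, 0)
-- ===== Notes on version B (the rewrite author's own statement) =====
-- stated objective: alternative
-- what changed: Instead of scanning for a line whose length is current_length-1, B builds a dictionary indexing each length to the last prior line with that length (no length comparison in the loop) and answers by a single dictionary lookup with default 0.
import Mathlib
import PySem

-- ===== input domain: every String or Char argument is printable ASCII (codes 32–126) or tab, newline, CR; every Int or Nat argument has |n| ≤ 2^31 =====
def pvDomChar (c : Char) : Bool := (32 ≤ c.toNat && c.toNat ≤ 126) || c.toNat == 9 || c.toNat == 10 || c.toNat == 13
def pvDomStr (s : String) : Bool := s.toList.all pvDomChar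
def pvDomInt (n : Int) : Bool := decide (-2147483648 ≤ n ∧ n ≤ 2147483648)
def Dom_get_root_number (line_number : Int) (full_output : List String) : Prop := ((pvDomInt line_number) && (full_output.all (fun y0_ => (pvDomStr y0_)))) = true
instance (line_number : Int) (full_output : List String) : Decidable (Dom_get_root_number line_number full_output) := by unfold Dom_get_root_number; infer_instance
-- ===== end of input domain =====

-- B replaces A's backward break-at-first-match scan with a dictionary indexing each line length
-- to the last prior line of that length, answered by one lookup; same cost, different data structure.

-- ===== PORT A =====
-- while index > 0: … break / index -= 1   (the 'none' branch is Python's IndexError, unreachable under Pre_)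
def pvALoop (full_output : List String) (current_length : Int) (index : Int) : Int :=
  if _h : 0 < index then
    match PySem.List.pyGet? full_output index with
    | some tmp => if (PySem.Str.len tmp : Int) = current_length - 1 then index
                  else pvALoop full_output current_length (index - 1)
    | none => 0
  else 0
termination_by index.toNat
decreasing_by omega

def get_root_number (line_number : Int) (full_output : List String) : Int :=
  match PySem.List.pyGet? full_output line_number with
  | some s => pvALoop full_output (PySem.Str.len s : Int) (line_number - 1)
  | none => 0  -- Python raises IndexError; excluded by Pre_

-- ===== PORT B =====
def pvDictOf (full_output : List String) (line_number : Int) : PySem.Dict Int Int :=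
  (PySem.List.pyRange 1 line_number 1).foldl
    (fun d i =>
      match PySem.List.pyGet? full_output i with
      | some t => d.insert (PySem.Str.len t : Int) i
      | none => d)  -- 'none' = Python IndexError, unreachable under Pre_
    PySem.Dict.empty

def get_root_number_alt (line_number : Int) (full_output : List String) : Int :=
  match PySem.List.pyGet? full_output line_number with
  | some s => (pvDictOf full_output line_number).getD ((PySem.Str.len s : Int) - 1) 0
  | none => 0  -- Python raises IndexError; excluded by Pre_

-- ===== PRECONDITION & SPEC =====
-- Pre_ excludes exactly the inputs on which Python's full_output[line_number] raises IndexError.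
def Pre_get_root_number (line_number : Int) (full_output : List String) : Prop :=
  PySem.Raise.InRange full_output.length line_number
instance (line_number : Int) (full_output : List String) : Decidable (Pre_get_root_number line_number full_output) := by unfold Pre_get_root_number; infer_instance

def pvWitness_get_root_number : Int × List String := (1, ["ab", "a"])

def Spec_get_root_number (line_number : Int) (full_output : List String) (out : Int) : Prop := out = get_root_number_alt line_number full_output
instance (line_number : Int) (full_output : List String) (out : Int) : Decidable (Spec_get_root_number line_number full_output out) := by unfold Spec_get_root_number; infer_instance

-- ===== CLAIM =====
def Claim_equal_get_root_number : Prop := ∀ (line_number : Int) (full_output : List String), Dom_get_root_number line_number full_output → Pre_get_root_number line_number full_output → Spec_get_root_number line_number full_output (get_root_number line_number full_output)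

-- ===== LEMMAS AND PROOFS =====

-- A's countdown loop from n equals B's dict (built over range(1, n+1)) looked up at cl-1:
-- the first match scanning down is the last insertion for that key.
theorem pvLoop_eq_dict (full_output : List String) (cl : Int) (n : Nat)
    (hn : (n : Int) < full_output.length) :
    pvALoop full_output cl (n : Int) =
      (pvDictOf full_output ((n : Int) + 1)).getD (cl - 1) 0 := by
  induction n with
  | zero =>
      rw [pvALoop]
      simp [pvDictOf]
  | succ m ih =>
      have hm : (m : Int) < full_output.length := by push_cast at hn ⊢; omega
      have hlt : m + 1 < full_output.length := by omega
      have hget : PySem.List.pyGet? full_output ((m : Int) + 1) = some full_output[m + 1] := by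
        have := PySem.List.pyGet?_natCast full_output (m + 1)
        simpa [List.getElem?_eq_getElem hlt] using this
      have hcast : ((m + 1 : Nat) : Int) = (m : Int) + 1 := by push_cast; ring
      rw [hcast]
      rw [show (m : Int) + 1 + 1 = ((m : Int) + 1) + 1 from rfl]
      unfold pvDictOf
      rw [PySem.List.pyRange_one_succ_right (by omega : (1:Int) ≤ (m : Int) + 1),
          List.foldl_append]
      simp only [List.foldl_cons, List.foldl_nil, hget]
      rw [PySem.Dict.getD_insert]
      rw [pvALoop, dif_pos (show (0:Int) < (m : Int) + 1 by omega), hget]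
      dsimp only
      rw [show (m : Int) + 1 - 1 = (m : Int) from by ring]
      rw [ih hm]
      unfold pvDictOf
      by_cases h : (PySem.Str.len full_output[m + 1] : Int) = cl - 1
      · rw [if_pos h, if_pos h.symm]
      · rw [if_neg h, if_neg (fun he => h he.symm)]

-- ===== VERDICT =====
theorem get_root_number_spec : Claim_equal_get_root_number := by
  intro line_number full_output _hdom hpre
  unfold Pre_get_root_number at hpre
  unfold Spec_get_root_number get_root_number get_root_number_alt
  cases hg : PySem.List.pyGet? full_output line_number with
  | none =>
      rw [PySem.List.pyGet?_eq_none_iff] at hg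
  | some s =>
      dsimp only
      by_cases hln : 0 < line_number
      · have hlen : line_number < (full_output.length : Int) := by
          unfold PySem.Raise.InRange at hpre; omega
        have hn : line_number - 1 = ((line_number - 1).toNat : Int) := by omega
        have hn' : ((line_number - 1).toNat : Int) < (full_output.length : Int) := by
          rw [← hn]; omega
        have := pvLoop_eq_dict full_output (PySem.Str.len s : Int) (line_number - 1).toNat hn'
        have harg : ((line_number - 1).toNat : Int) + 1 = line_number := by omega
        rw [hn, this, harg]
      · have h1 : ¬ 0 < line_number - 1 := by omega
        have h2 : line_number ≤ 1 := by omega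
        rw [pvALoop, dif_neg h1]
        unfold pvDictOf
        rw [PySem.List.pyRange_one_eq_nil h2]
        rfl
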